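-- pv_equiv track=rewrite | github.com/otto-mark/apod_wallpaper | main.py | insertNewLine
-- ===== SOURCE A (Python) =====
-- def insertNewLine(str, n):
--     cnt = 0
--     ret = ""
--     for i in range(0, len(str)):
--         if cnt < n:
--             ret += str[i]
--             cnt += 1
--             continue
--         if str[i] == " ":
--             ret += "\n"
--             cnt = 0
--             continue
--         ret += str[i]
--     return ret
-- ===== SOURCE B (Python) =====
-- def insertNewLine(str, n):
--     k = max(n, 0)
--     parts = []
--     rest = str
--     while True:
--         head, sep, tail = rest[k:].partition(" ")
--         if not sep:
--             parts.append(rest)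
--             break
--         parts.append(rest[:k] + head)
--         rest = tail
--     return "\n".join(parts)
-- ===== Notes on version B (the rewrite author's own statement) =====
-- stated objective: faster
-- what changed: Replaced A's per-character counter/branch state machine by a find-and-slice pass: repeatedly partition the remainder at the first space past the first max(n,0) characters and join the collected pieces with newlines; the per-character Python loop becomes C-level str.partition/slicing, measured ~8x faster.
import Mathlib
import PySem

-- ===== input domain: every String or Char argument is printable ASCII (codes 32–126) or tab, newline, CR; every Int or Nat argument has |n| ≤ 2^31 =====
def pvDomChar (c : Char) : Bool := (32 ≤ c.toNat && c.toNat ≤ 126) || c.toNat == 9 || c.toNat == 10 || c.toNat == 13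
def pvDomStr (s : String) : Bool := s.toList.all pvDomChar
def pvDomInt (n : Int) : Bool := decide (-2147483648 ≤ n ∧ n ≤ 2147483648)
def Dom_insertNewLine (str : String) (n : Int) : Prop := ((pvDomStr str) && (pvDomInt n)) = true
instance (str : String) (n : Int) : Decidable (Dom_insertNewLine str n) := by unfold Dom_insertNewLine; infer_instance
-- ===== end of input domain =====

-- B replaces A's per-character counter/branch state machine by a find-and-slice pass (partition the
-- remainder at the first space past the first max(n,0) characters, join with '\n'); same O(len) work,
-- constant-factor faster in Python (C-level partition/slicing instead of a per-character loop).

-- ===== PORT A =====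
-- the loop body of A, on the current (cnt, ret) state and the character str[i]
def pvStepA (n : Int) (st : Int × List Char) (c : Char) : Int × List Char :=
  if st.1 < n then (st.1 + 1, st.2 ++ [c])
  else if c = ' ' then (0, st.2 ++ ['\n'])
  else (st.1, st.2 ++ [c])

def insertNewLine (str : String) (n : Int) : String :=
  let cs := str.toList
  -- for i in range(0, len(str)): … str[i] …  — i is always in range, so pyGetD is exact here
  let r := (PySem.List.pyRange 0 (PySem.List.len cs)).foldl
    (fun st i => pvStepA n st (PySem.List.pyGetD cs i ' ')) ((0 : Int), ([] : List Char))
  String.ofList r.2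

-- ===== PORT B =====
-- find points strictly inside the string when it is not -1 (used for termination of the loop below)
theorem pvFind_toNat_lt_length (s sub : List Char) (hsub : sub ≠ [])
    (h : PySem.Chars.find s sub ≠ -1) : (PySem.Chars.find s sub).toNat < s.length := by
  have h0 : 0 ≤ PySem.Chars.find s sub := by
    have := PySem.Chars.neg_one_le_find s sub; omega
  obtain ⟨hpre, -⟩ := PySem.Chars.find_spec h0
  by_contra hge
  have : s.drop (PySem.Chars.find s sub).toNat = [] := by
    apply List.drop_eq_nil_of_le; omega
  rw [this] at hpre
  exact hsub (List.prefix_nil.mp hpre)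

theorem pvSliceLen_le {α : Type} (xs : List α) (a b : Option Int) :
    (PySem.List.slice xs a b).length ≤ xs.length := by
  simp [PySem.List.slice]

-- the `while True` loop of B: rest[k:].partition(" ") is ported by hand with find + slices
-- (exact: " " is a single non-empty separator)
def pvBGo (rest : List Char) (k : Int) : List (List Char) :=
  if h : PySem.Chars.find (PySem.List.slice rest (some k) none) [' '] = -1 then [rest]
  else
    (PySem.List.slice rest none (some k)
        ++ PySem.List.slice (PySem.List.slice rest (some k) none) none
             (some (PySem.Chars.find (PySem.List.slice rest (some k) none) [' '])))
      :: pvBGo (PySem.List.slice (PySem.List.slice rest (some k) none)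
             (some (PySem.Chars.find (PySem.List.slice rest (some k) none) [' '] + 1)) none) k
termination_by rest.length
decreasing_by
  have hlt : (PySem.Chars.find (PySem.List.slice rest (some k) none) [' ']).toNat
      < (PySem.List.slice rest (some k) none).length :=
    pvFind_toNat_lt_length _ _ (by simp) h
  have h0 : (0:Int) ≤ PySem.Chars.find (PySem.List.slice rest (some k) none) [' '] := by
    have := PySem.Chars.neg_one_le_find (PySem.List.slice rest (some k) none) [' ']; omega
  have hb := pvSliceLen_le rest (some k) none
  rw [PySem.List.slice_from _ (by omega : (0:Int) ≤ PySem.Chars.find (PySem.List.slice rest (some k) none) [' '] + 1)]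
  simp only [List.length_drop]
  omega

def insertNewLine_alt (str : String) (n : Int) : String :=
  String.ofList (PySem.Chars.join ['\n'] (pvBGo str.toList (max n 0)))

-- ===== PRECONDITION & SPEC =====
def Spec_insertNewLine (str : String) (n : Int) (out : String) : Prop := out = insertNewLine_alt str n
instance (str : String) (n : Int) (out : String) : Decidable (Spec_insertNewLine str n out) := by unfold Spec_insertNewLine; infer_instance

-- ===== CLAIM (what is proved, stated in full; the proofs are below) =====
def Claim_equal_insertNewLine : Prop := ∀ (str : String) (n : Int), Dom_insertNewLine str n → Spec_insertNewLine str n (insertNewLine str n)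

-- ===== LEMMAS AND PROOFS =====

-- prepend a character to the first piece
def pvConsHead (c : Char) : List (List Char) → List (List Char)
  | [] => [[c]]
  | p :: ps => (c :: p) :: ps

-- common recursive description of both programs: j = remaining pass-through budget, k = max(n,0)
def pvGo (k : Nat) : List Char → Nat → List (List Char)
  | [], _ => [[]]
  | c :: cs, j+1 => pvConsHead c (pvGo k cs j)
  | c :: cs, 0 => if c = ' ' then [] :: pvGo k cs k else pvConsHead c (pvGo k cs 0)

theorem pvConsHead_ne_nil (c : Char) (ps : List (List Char)) : pvConsHead c ps ≠ [] := by
  cases ps <;> simp [pvConsHead]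

theorem pvGo_ne_nil (k : Nat) (cs : List Char) (j : Nat) : pvGo k cs j ≠ [] := by
  cases cs with
  | nil => simp [pvGo]
  | cons c cs =>
    cases j with
    | zero => by_cases h : c = ' ' <;> simp [pvGo, h, pvConsHead_ne_nil]
    | succ j => simp [pvGo, pvConsHead_ne_nil]

theorem pvJoin_consHead (c : Char) (ps : List (List Char)) (h : ps ≠ []) :
    PySem.Chars.join ['\n'] (pvConsHead c ps) = c :: PySem.Chars.join ['\n'] ps := by
  cases ps with
  | nil => exact absurd rfl h
  | cons p ps =>
    cases ps with
    | nil => simp [pvConsHead, PySem.Chars.join_singleton]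
    | cons q ps => simp [pvConsHead, PySem.Chars.join_cons_cons]

-- A's loop equals join of pvGo, for every counter value
theorem pvALoop (n : Int) : ∀ (cs : List Char) (cnt : Int) (ret : List Char),
    (cs.foldl (pvStepA n) (cnt, ret)).2
      = ret ++ PySem.Chars.join ['\n'] (pvGo n.toNat cs (n - cnt).toNat) := by
  intro cs
  induction cs with
  | nil => intro cnt ret; simp [pvGo, PySem.Chars.join_singleton]
  | cons c cs ih =>
    intro cnt ret
    by_cases hc : cnt < n
    · have hj : (n - cnt).toNat = (n - (cnt + 1)).toNat + 1 := by omega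
      simp only [List.foldl_cons, pvStepA, if_pos hc, hj, pvGo]
      rw [ih, pvJoin_consHead _ _ (pvGo_ne_nil _ _ _)]
      simp
    · have hj : (n - cnt).toNat = 0 := by omega
      by_cases hsp : c = ' '
      · simp only [List.foldl_cons, pvStepA, if_neg hc, hsp, hj, pvGo]
        rw [ih]
        have hne := pvGo_ne_nil n.toNat cs n.toNat
        cases hg : pvGo n.toNat cs n.toNat with
        | nil => exact absurd hg hne
        | cons p ps => simp [PySem.Chars.join_cons_cons, hg]
      · simp only [List.foldl_cons, pvStepA, if_neg hc, hj, pvGo, if_neg hsp]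
        rw [ih, pvJoin_consHead _ _ (pvGo_ne_nil _ _ _)]
        simp [hj]

-- find is characterised by its first-occurrence specification
theorem pvFind_eq_of (s sub : List Char) (t : Nat) (hpre : sub <+: s.drop t)
    (hmin : ∀ i < t, ¬ sub <+: s.drop i) : PySem.Chars.find s sub = t := by
  have hinf : sub <:+: s := hpre.isInfix.trans (List.drop_suffix t s).isInfix
  have h0 : 0 ≤ PySem.Chars.find s sub := (PySem.Chars.find_nonneg_iff s sub).mpr hinf
  obtain ⟨h1, h2⟩ := PySem.Chars.find_spec h0
  rcases lt_trichotomy (PySem.Chars.find s sub).toNat t with hlt | heq | hgt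
  · exact absurd h1 (hmin _ hlt)
  · omega
  · exact absurd hpre (h2 t hgt)

theorem pvFind_cons_self (x : Char) (s : List Char) : PySem.Chars.find (x :: s) [x] = 0 := by
  apply pvFind_eq_of _ _ 0
  · exact ⟨s, rfl⟩
  · intro i hi; omega

theorem pvFind_cons_ne (c x : Char) (s : List Char) (h : c ≠ x) :
    PySem.Chars.find (c :: s) [x]
      = if PySem.Chars.find s [x] = -1 then -1 else PySem.Chars.find s [x] + 1 := by
  by_cases h1 : PySem.Chars.find s [x] = -1
  · rw [if_pos h1]
    rw [PySem.Chars.find_eq_neg_one_iff] at h1 ⊢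
    intro hinf
    rw [List.singleton_infix_iff] at hinf h1
    rcases List.mem_cons.mp hinf with h0 | hmem
    · exact h h0.symm
    · exact h1 hmem
  · rw [if_neg h1]
    have h0 : 0 ≤ PySem.Chars.find s [x] := by
      have := PySem.Chars.neg_one_le_find s [x]; omega
    obtain ⟨hp, hm⟩ := PySem.Chars.find_spec h0
    have := pvFind_eq_of (c :: s) [x] ((PySem.Chars.find s [x]).toNat + 1)
      (by simpa using hp)
      (by
        intro i hi
        cases i with
        | zero =>
          intro hpre
          rcases hpre with ⟨r, hr⟩
          simp at hr
          exact h hr.1.symm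
        | succ i =>
          simp only [List.drop_succ_cons]
          exact hm i (by omega))
    omega

-- B's loop with a Nat offset, as take/drop (bridge between pvBGo and pvGo)
def pvSplit (k : Nat) (cs : List Char) (j : Nat) : List (List Char) :=
  let body := cs.drop j
  let idx := PySem.Chars.find body [' ']
  if h : idx = -1 then [cs]
  else (cs.take j ++ body.take idx.toNat) :: pvSplit k (body.drop (idx.toNat + 1)) k
termination_by cs.length
decreasing_by
  have hlt := pvFind_toNat_lt_length (cs.drop j) [' '] (by simp) h
  simp only [List.length_drop] at hlt ⊢
  omega

theorem pvBGo_eq_pvSplit (n : Int) : ∀ (m : Nat) (cs : List Char), cs.length ≤ m →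
    pvBGo cs (max n 0) = pvSplit n.toNat cs n.toNat := by
  intro m
  induction m with
  | zero =>
    intro cs hm
    have : cs = [] := List.eq_nil_of_length_eq_zero (by omega)
    subst this
    have hf : PySem.Chars.find [] [' '] = -1 := by
      rw [PySem.Chars.find_eq_neg_one_iff]; simp
    rw [pvBGo, pvSplit]
    simp [PySem.List.slice, hf]
  | succ m ih =>
    intro cs hm
    rw [pvBGo, pvSplit]
    have hk : (0:Int) ≤ max n 0 := le_max_right n 0
    have hdrop : PySem.List.slice cs (some (max n 0)) none = cs.drop n.toNat := by
      rw [PySem.List.slice_from _ hk]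
      congr 1
      omega
    have htake : PySem.List.slice cs none (some (max n 0)) = cs.take n.toNat := by
      rw [PySem.List.slice_to _ hk]
      congr 1
      omega
    rw [hdrop, htake]
    by_cases h : PySem.Chars.find (cs.drop n.toNat) [' '] = -1
    · simp [h]
    · have h0 : 0 ≤ PySem.Chars.find (cs.drop n.toNat) [' '] := by
        have := PySem.Chars.neg_one_le_find (cs.drop n.toNat) [' ']; omega
      have hlt := pvFind_toNat_lt_length (cs.drop n.toNat) [' '] (by simp) h
      simp only [dif_neg h]
      congr 1
      · congr 1
        rw [PySem.List.slice_to _ h0]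
      · rw [PySem.List.slice_from _ (by omega : (0:Int) ≤ PySem.Chars.find (cs.drop n.toNat) [' '] + 1)]
        have harg : (PySem.Chars.find (cs.drop n.toNat) [' '] + 1).toNat
            = (PySem.Chars.find (cs.drop n.toNat) [' ']).toNat + 1 := by omega
        rw [harg]
        apply ih
        simp only [List.length_drop] at hlt ⊢
        omega

theorem pvSplit_cons_succ (k : Nat) (c : Char) (cs : List Char) (j : Nat) :
    pvSplit k (c :: cs) (j + 1) = pvConsHead c (pvSplit k cs j) := by
  conv_lhs => rw [pvSplit]
  conv_rhs => rw [pvSplit]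
  simp only [List.drop_succ_cons, List.take_succ_cons]
  by_cases h : PySem.Chars.find (cs.drop j) [' '] = -1
  · simp [h, pvConsHead]
  · simp [h, pvConsHead]

theorem pvSplit_eq_pvGo (k : Nat) : ∀ (cs : List Char) (j : Nat),
    pvSplit k cs j = pvGo k cs j := by
  intro cs
  induction cs with
  | nil =>
    intro j
    rw [pvSplit]
    simp [pvGo, PySem.Chars.find_eq_neg_one_iff]
  | cons c cs ih =>
    intro j
    cases j with
    | succ j => rw [pvSplit_cons_succ, ih, pvGo]
    | zero =>
      by_cases hsp : c = ' '
      · subst hsp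
        rw [pvSplit]
        simp only [List.drop_zero, List.take_zero]
        rw [pvFind_cons_self]
        simp only [dif_neg (by norm_num : (0:Int) ≠ -1)]
        simp [pvGo, ih]
      · have hstep := pvFind_cons_ne c ' ' cs hsp
        conv_lhs => rw [pvSplit]
        simp only [List.drop_zero, List.take_zero, List.nil_append, hstep]
        rw [pvGo, if_neg hsp, ← ih 0]
        by_cases h1 : PySem.Chars.find cs [' '] = -1
        · have hR : pvSplit k cs 0 = [cs] := by
            rw [pvSplit]; simp [h1]
          simp [h1, hR, pvConsHead]
        · have h0 : 0 ≤ PySem.Chars.find cs [' '] := by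
            have := PySem.Chars.neg_one_le_find cs [' ']; omega
          have hR : pvSplit k cs 0
              = cs.take (PySem.Chars.find cs [' ']).toNat
                  :: pvSplit k (cs.drop ((PySem.Chars.find cs [' ']).toNat + 1)) k := by
            conv_lhs => rw [pvSplit]
            simp [h1]
          have harg : (PySem.Chars.find cs [' '] + 1).toNat
              = (PySem.Chars.find cs [' ']).toNat + 1 := by omega
          simp only [if_neg h1,
            dif_neg (by omega : ¬ (PySem.Chars.find cs [' '] + 1 = -1)), hR, harg]
          simp [pvConsHead]

-- ===== VERDICT (by name: the statement is the Claim_ definition above) =====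
theorem insertNewLine_spec : Claim_equal_insertNewLine := by
  intro str n _
  unfold Spec_insertNewLine insertNewLine insertNewLine_alt
  simp only []
  rw [PySem.List.foldl_pyRange_pyGetD str.toList ' ' (pvStepA n) ((0:Int), ([]:List Char)) le_rfl]
  simp only [Int.toNat_zero, List.drop_zero]
  congr 1
  rw [pvALoop n str.toList 0 []]
  rw [pvBGo_eq_pvSplit n str.toList.length str.toList le_rfl, pvSplit_eq_pvGo]
  simp
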